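-- pv_equiv track=rewrite | github.com/collective/collective.contentgroups | src/collective/contentgroups/utils.py | _find_all_groups_for_principal_id
-- ===== SOURCE A (Python) =====
-- def _find_all_groups_for_principal_id(mapping, principal_id, found=None):
--     """Find all group ids for the principal id.
--
--     This includes recursive groups.
--     This is only meant for content groups.
--     The mapping is from content group id to a list of users.
--
--     Note: this changes 'found' in place.
--     This is to avoid infinite loops when groups contain each other in a circle.
--     """
--     if found is None:
--         found = set()
--     extra = set()
--     for group_id, users in mapping.items():
--         if principal_id in users and group_id not in found:
--             extra.add(group_id)
--             found.add(group_id)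
--     for group_id in extra:
--         _find_all_groups_for_principal_id(mapping, group_id, found)
--     return found
-- ===== SOURCE B (Python) =====
-- def _find_all_groups_for_principal_id(mapping, principal_id, found=None):
--     """Find all group ids for the principal id (including recursive groups).
--
--     Same contract as the original; like it, this mutates 'found' in place.
--     Different strategy: build a reverse index user -> groups once, then run an
--     iterative worklist traversal over it instead of recursing with repeated
--     scans of the mapping.
--     """
--     if found is None:
--         found = set()
--     pairs = [(user, group_id)
--              for group_id, users in mapping.items()
--              for user in dict.fromkeys(users)]
--     index = {}
--     for user, group_id in pairs:
--         index.setdefault(user, []).append(group_id)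
--     stack = [principal_id]
--     while stack:
--         pid = stack.pop(0)
--         new = []
--         for group_id in index.get(pid, []):
--             if group_id not in found:
--                 found.add(group_id)
--                 new.append(group_id)
--         stack = new + stack
--     return found
-- ===== Notes on version B (the rewrite author's own statement) =====
-- stated objective: alternative
-- what changed: Instead of rescanning the entire mapping once per discovered group via recursion, B builds a reverse index user->groups once and then runs an iterative worklist (DFS) traversal over it.
import Mathlib
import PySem

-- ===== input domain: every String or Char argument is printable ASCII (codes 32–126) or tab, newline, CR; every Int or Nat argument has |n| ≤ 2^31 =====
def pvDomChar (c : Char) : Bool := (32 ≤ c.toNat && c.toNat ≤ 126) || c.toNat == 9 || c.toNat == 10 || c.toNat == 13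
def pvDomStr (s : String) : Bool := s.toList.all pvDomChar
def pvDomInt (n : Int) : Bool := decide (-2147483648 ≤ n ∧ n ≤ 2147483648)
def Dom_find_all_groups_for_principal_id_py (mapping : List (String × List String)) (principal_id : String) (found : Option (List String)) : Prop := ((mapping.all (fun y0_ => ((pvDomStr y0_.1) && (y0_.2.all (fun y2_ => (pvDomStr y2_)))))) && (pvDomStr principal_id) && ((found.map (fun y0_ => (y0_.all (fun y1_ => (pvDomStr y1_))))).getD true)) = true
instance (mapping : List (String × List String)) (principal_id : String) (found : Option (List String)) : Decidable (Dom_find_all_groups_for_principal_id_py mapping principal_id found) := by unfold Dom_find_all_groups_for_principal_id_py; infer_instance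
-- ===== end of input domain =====

-- B replaces A's per-group rescans of the whole mapping by a reverse index user→groups built
-- once plus an iterative worklist traversal (objective: alternative). Like A, the Python B
-- mutates the passed-in 'found' set in place; the equivalence is about the return value.

-- ===== PORT A =====
-- recursion ported with fuel: each nested call strictly grows 'found' with mapping keys,
-- so mapping.length + 1 levels are never exhausted
def goA (mapping : List (String × List String)) (fuel : Nat) (principal_id : String) (found : PySem.Set String) : PySem.Set String :=
  match fuel with
  | 0 => found
  | Nat.succ n =>
    let st := mapping.foldl
      (fun (st : PySem.Set String × PySem.Set String) gu =>
        if principal_id ∈ gu.2 ∧ gu.1 ∉ st.2 then (PySem.Set.add st.1 gu.1, PySem.Set.add st.2 gu.1) else st)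
      (PySem.Set.empty, found)
    st.1.foldl (fun f g => goA mapping n g f) st.2

def find_all_groups_for_principal_id_py (mapping : List (String × List String)) (principal_id : String) (found : Option (List String)) : List String :=
  let f0 : PySem.Set String := match found with
    | none => PySem.Set.empty
    | some l => PySem.Set.ofList l
  goA mapping (mapping.length + 1) principal_id f0

-- ===== PORT B =====
def buildIdxB (mapping : List (String × List String)) : PySem.Dict String (List String) :=
  (mapping.flatMap (fun gu => (PySem.List.dedup gu.2).map (fun u => (u, gu.1)))).foldl
    (fun d p => d.modify p.1 [] (· ++ [p.2])) PySem.Dict.empty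

-- while-loop ported with fuel: each iteration pops one id; at most mapping.length + 1 ids
-- are ever on the worklist, so mapping.length + 2 iterations are never exhausted
def loopB (idx : PySem.Dict String (List String)) (fuel : Nat) (found : PySem.Set String) (stack : List String) : PySem.Set String :=
  match fuel, stack with
  | 0, _ => found
  | Nat.succ _, [] => found
  | Nat.succ n, pid :: rest =>
    let r := (idx.getD pid []).foldl
      (fun (st : List String × PySem.Set String) g =>
        if g ∉ st.2 then (st.1 ++ [g], PySem.Set.add st.2 g) else st) ([], found)
    loopB idx n r.2 (r.1 ++ rest)

def find_all_groups_for_principal_id_py_alt (mapping : List (String × List String)) (principal_id : String) (found : Option (List String)) : List String :=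
  let f0 : PySem.Set String := match found with
    | none => PySem.Set.empty
    | some l => PySem.Set.ofList l
  loopB (buildIdxB mapping) (mapping.length + 2) f0 [principal_id]

-- ===== PRECONDITION & SPEC =====
def Spec_find_all_groups_for_principal_id_py (mapping : List (String × List String)) (principal_id : String) (found : Option (List String)) (out : List String) : Prop := out = find_all_groups_for_principal_id_py_alt mapping principal_id found
instance (mapping : List (String × List String)) (principal_id : String) (found : Option (List String)) (out : List String) : Decidable (Spec_find_all_groups_for_principal_id_py mapping principal_id found out) := by unfold Spec_find_all_groups_for_principal_id_py; infer_instance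

-- ===== CLAIM (what is proved, stated in full; the proofs are below) =====
def Claim_equal_find_all_groups_for_principal_id_py : Prop := ∀ (mapping : List (String × List String)) (principal_id : String) (found : Option (List String)), Dom_find_all_groups_for_principal_id_py mapping principal_id found → Spec_find_all_groups_for_principal_id_py mapping principal_id found (find_all_groups_for_principal_id_py mapping principal_id found)

-- ===== LEMMAS AND PROOFS =====

-- groups whose user list contains p, in mapping order
def selL (mapping : List (String × List String)) (p : String) : List String :=
  mapping.filterMap (fun gu => if p ∈ gu.2 then some gu.1 else none)

-- the new group ids one expansion step adds, starting from found f
def nwOf (L : List String) (f : PySem.Set String) : List String :=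
  (L.foldl (fun (st : List String × PySem.Set String) g =>
      if g ∉ st.2 then (st.1 ++ [g], PySem.Set.add st.2 g) else st) ([], f)).1

-- number of mapping keys not yet in f
def muF (mapping : List (String × List String)) (f : List String) : Nat :=
  (PySem.List.dedup (mapping.map Prod.fst)).countP (fun k => decide (k ∉ f))

-- canonical evaluation of goA with just-sufficient fuel
def cgo (mapping : List (String × List String)) (f : PySem.Set String) (p : String) : PySem.Set String :=
  goA mapping (muF mapping f + 1) p f

theorem set_add_of_not_mem (s : List String) (x : String) (h : x ∉ s) :
    PySem.Set.add s x = s ++ [x] := by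
  simp [PySem.Set.add, PySem.Set.contains, h]

theorem foldB_shift (L : List String) : ∀ (e f : List String),
    L.foldl (fun (st : List String × PySem.Set String) g =>
        if g ∉ st.2 then (st.1 ++ [g], PySem.Set.add st.2 g) else st) (e, f)
      = (e ++ nwOf L f, (L.foldl (fun (st : List String × PySem.Set String) g =>
          if g ∉ st.2 then (st.1 ++ [g], PySem.Set.add st.2 g) else st) ([], f)).2) := by
  induction L with
  | nil => intro e f; simp [nwOf]
  | cons g L ih =>
    intro e f
    by_cases hg : g ∈ f
    · simp only [List.foldl_cons, nwOf, if_neg (not_not_intro hg)]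
      exact ih e f
    · simp only [List.foldl_cons, nwOf, if_pos hg]
      rw [ih (e ++ [g]), ih ([] ++ [g])]
      simp [List.append_assoc, nwOf]

theorem foldB_snd (L : List String) : ∀ (f : List String),
    (L.foldl (fun (st : List String × PySem.Set String) g =>
        if g ∉ st.2 then (st.1 ++ [g], PySem.Set.add st.2 g) else st) ([], f)).2
      = f ++ nwOf L f := by
  induction L with
  | nil => intro f; simp [nwOf]
  | cons g L ih =>
    intro f
    by_cases hg : g ∈ f
    · simp only [List.foldl_cons, nwOf, if_neg (not_not_intro hg)]
      exact ih f
    · simp only [List.foldl_cons, nwOf, if_pos hg]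
      rw [set_add_of_not_mem f g hg]
      simp only [List.nil_append]
      rw [foldB_shift L [g] (f ++ [g])]
      simp only [nwOf]
      rw [ih (f ++ [g])]
      simp [nwOf, List.append_assoc]

theorem nw_props (L : List String) : ∀ (f : List String),
    (∀ g ∈ nwOf L f, g ∉ f ∧ g ∈ L) ∧ (nwOf L f).Nodup := by
  induction L with
  | nil => intro f; simp [nwOf]
  | cons g L ih =>
    intro f
    by_cases hg : g ∈ f
    · have : nwOf (g :: L) f = nwOf L f := by
        simp only [nwOf, List.foldl_cons, if_neg (not_not_intro hg)]
      rw [this]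
      refine ⟨fun x hx => ⟨(ih f).1 x hx |>.1, .tail _ ((ih f).1 x hx).2⟩, (ih f).2⟩
    · have : nwOf (g :: L) f = g :: nwOf L (f ++ [g]) := by
        simp only [nwOf, List.foldl_cons, if_pos hg, set_add_of_not_mem f g hg, List.nil_append]
        rw [foldB_shift L [g] (f ++ [g])]
        simp [nwOf]
      rw [this]
      have h1 := (ih (f ++ [g])).1
      constructor
      · intro x hx
        rcases List.mem_cons.mp hx with rfl | hx
        · exact ⟨hg, .head _⟩
        · have := h1 x hx
          simp only [List.mem_append, List.mem_singleton] at this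
          exact ⟨fun hf => this.1 (Or.inl hf), .tail _ this.2⟩
      · refine List.Nodup.cons ?_ (ih (f ++ [g])).2
        intro hgmem
        have := h1 g hgmem
        simp at this

theorem scanA_eq (p : String) (m : List (String × List String)) : ∀ (e f : List String),
    (∀ x ∈ e, x ∈ f) →
    m.foldl (fun (st : PySem.Set String × PySem.Set String) gu =>
        if p ∈ gu.2 ∧ gu.1 ∉ st.2 then (PySem.Set.add st.1 gu.1, PySem.Set.add st.2 gu.1) else st) (e, f)
      = (selL m p).foldl (fun (st : List String × PySem.Set String) g =>
          if g ∉ st.2 then (st.1 ++ [g], PySem.Set.add st.2 g) else st) (e, f) := by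
  induction m with
  | nil => intro e f _; simp [selL]
  | cons gu m ih =>
    intro e f he
    by_cases hp : p ∈ gu.2
    · have hsel : selL (gu :: m) p = gu.1 :: selL m p := by simp [selL, hp]
      rw [hsel]
      by_cases hf : gu.1 ∈ f
      · rw [List.foldl_cons, List.foldl_cons, if_neg (fun h => h.2 hf), if_neg (not_not_intro hf)]
        exact ih e f he
      · have hne : gu.1 ∉ e := fun h => hf (he _ h)
        rw [List.foldl_cons, List.foldl_cons, if_pos (show p ∈ gu.2 ∧ gu.1 ∉ f from ⟨hp, hf⟩), if_pos hf,
          set_add_of_not_mem e gu.1 hne]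
        exact ih (e ++ [gu.1]) (PySem.Set.add f gu.1) (by
          rw [set_add_of_not_mem f gu.1 hf]
          intro x hx
          rcases List.mem_append.mp hx with h | h
          · exact List.mem_append.mpr (Or.inl (he x h))
          · exact List.mem_append.mpr (Or.inr h))
    · have hsel : selL (gu :: m) p = selL m p := by simp [selL, hp]
      rw [hsel]
      rw [List.foldl_cons, if_neg (fun h => hp h.1)]
      exact ih e f he

theorem map_filter_nodup (p g : String) (l : List String) (hl : l.Nodup) :
    ((l.map (fun u => (u, g))).filter (fun q => q.1 == p)).map Prod.snd
      = if p ∈ l then [g] else [] := by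
  induction l with
  | nil => simp
  | cons u l ih =>
    rcases List.nodup_cons.mp hl with ⟨hu, hl'⟩
    by_cases hup : u = p
    · subst hup
      simp [ih hl', if_neg hu]
    · have hne : ((u, g).1 == p) = false := by simpa using hup
      simp only [List.map_cons, List.filter_cons, hne, Bool.false_eq_true, if_false, ih hl',
        List.mem_cons]
      rw [if_congr (show (p = u ∨ p ∈ l) ↔ p ∈ l from
        ⟨fun h => h.resolve_left (fun h => hup h.symm), Or.inr⟩) rfl rfl]

theorem idx_getD (m : List (String × List String)) (p : String) :
    (buildIdxB m).getD p [] = selL m p := by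
  unfold buildIdxB
  rw [PySem.Dict.getD_foldl_modify_append]
  rw [PySem.Dict.getD_empty]
  simp only [List.nil_append]
  induction m with
  | nil => simp [selL]
  | cons gu m ih =>
    simp only [List.flatMap_cons, List.filter_append, List.map_append, ih]
    rw [map_filter_nodup p gu.1 (PySem.List.dedup gu.2) (PySem.List.nodup_dedup _)]
    by_cases hp : p ∈ gu.2
    · simp [selL, hp]
    · simp [selL, hp]

theorem sel_sub (m : List (String × List String)) (p : String) :
    ∀ g ∈ selL m p, g ∈ m.map Prod.fst := by
  intro g hg
  rcases List.mem_filterMap.mp hg with ⟨gu, hgu, hsel⟩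
  have : gu.1 = g := by
    by_cases h : p ∈ gu.2 <;> simp [h] at hsel
    exact hsel
  exact this ▸ List.mem_map.mpr ⟨gu, hgu, rfl⟩

theorem goA_succ_eq (m : List (String × List String)) (n : Nat) (p : String) (f : List String) :
    goA m (n + 1) p f
      = (nwOf (selL m p) f).foldl (fun f g => goA m n g f) (f ++ nwOf (selL m p) f) := by
  show ((m.foldl
      (fun (st : PySem.Set String × PySem.Set String) gu =>
        if p ∈ gu.2 ∧ gu.1 ∉ st.2 then (PySem.Set.add st.1 gu.1, PySem.Set.add st.2 gu.1) else st)
      (PySem.Set.empty, f)).1.foldl (fun f g => goA m n g f)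
      (m.foldl
      (fun (st : PySem.Set String × PySem.Set String) gu =>
        if p ∈ gu.2 ∧ gu.1 ∉ st.2 then (PySem.Set.add st.1 gu.1, PySem.Set.add st.2 gu.1) else st)
      (PySem.Set.empty, f)).2) = _
  rw [show (PySem.Set.empty : PySem.Set String) = ([] : List String) from rfl]
  rw [scanA_eq p m [] f (by intro x hx; cases hx)]
  rw [foldB_snd]
  rfl

theorem goA_extend (m : List (String × List String)) :
    ∀ (n : Nat) (p : String) (f : List String), ∃ t, goA m n p f = f ++ t := by
  intro n
  induction n with
  | zero => intro p f; exact ⟨[], by simp [goA]⟩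
  | succ n ih =>
    intro p f
    rw [goA_succ_eq]
    have inner : ∀ (l : List String) (f0 : List String), ∃ t,
        l.foldl (fun f g => goA m n g f) f0 = f0 ++ t := by
      intro l
      induction l with
      | nil => intro f0; exact ⟨[], by simp⟩
      | cons g l ihl =>
        intro f0
        simp only [List.foldl_cons]
        obtain ⟨t1, ht1⟩ := ih g f0
        obtain ⟨t2, ht2⟩ := ihl (goA m n g f0)
        exact ⟨t1 ++ t2, by rw [ht2, ht1, List.append_assoc]⟩
    obtain ⟨t, ht⟩ := inner (nwOf (selL m p) f) (f ++ nwOf (selL m p) f)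
    exact ⟨nwOf (selL m p) f ++ t, by rw [ht, List.append_assoc]⟩

theorem countP_split (l f nw : List String) (h : ∀ g ∈ nw, g ∉ f) :
    l.countP (fun k => decide (k ∉ f))
      = l.countP (fun k => decide (k ∉ f ++ nw)) + l.countP (fun k => decide (k ∈ nw)) := by
  induction l with
  | nil => simp
  | cons a l ih =>
    simp only [List.countP_cons, ih]
    by_cases ha : a ∈ nw
    · have haf : a ∉ f := h a ha
      simp [ha, haf]
      omega
    · by_cases haf : a ∈ f
      · simp [ha, haf]
      · simp [ha, haf]
        omega

theorem countP_mem_of_nodup (l nw : List String) (hl : l.Nodup) (hnw : nw.Nodup)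
    (hsub : ∀ g ∈ nw, g ∈ l) : l.countP (fun k => decide (k ∈ nw)) = nw.length := by
  rw [List.countP_eq_length_filter]
  have hperm : (l.filter (fun k => decide (k ∈ nw))).Perm nw := by
    rw [List.perm_ext_iff_of_nodup (hl.filter _) hnw]
    intro a
    simp only [List.mem_filter, decide_eq_true_eq]
    exact ⟨fun h => h.2, fun h => ⟨hsub a h, h⟩⟩
  exact hperm.length_eq

theorem mu_split (m : List (String × List String)) (f : List String) (p : String) :
    muF m f = muF m (f ++ nwOf (selL m p) f) + (nwOf (selL m p) f).length := by
  have hp := nw_props (selL m p) f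
  unfold muF
  rw [countP_split _ f (nwOf (selL m p) f) (fun g hg => (hp.1 g hg).1)]
  congr 1
  exact countP_mem_of_nodup _ _ (PySem.List.nodup_dedup _) hp.2
    (fun g hg => (PySem.List.mem_dedup _ g).mpr (sel_sub m p g (hp.1 g hg).2))

theorem mu_antitone (m : List (String × List String)) (f f' : List String)
    (h : ∀ x ∈ f, x ∈ f') : muF m f' ≤ muF m f := by
  unfold muF
  apply List.countP_mono_left
  intro a _ ha
  simp only [decide_eq_true_eq] at ha ⊢
  exact fun hmem => ha (h a hmem)

theorem mu_le_len (m : List (String × List String)) (f : List String) :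
    muF m f ≤ m.length := by
  have h1 : muF m f ≤ (PySem.List.dedup (m.map Prod.fst)).length := List.countP_le_length
  have hnd : (PySem.List.dedup (m.map Prod.fst)).Nodup := PySem.List.nodup_dedup _
  have hsub : PySem.List.dedup (m.map Prod.fst) ⊆ m.map Prod.fst :=
    fun a ha => (PySem.List.mem_dedup _ a).mp ha
  have h2 := (hnd.subperm hsub).length_le
  simpa [List.length_map] using le_trans h1 h2

theorem goA_fuel_irrel (m : List (String × List String)) :
    ∀ (N : Nat) (f : List String), muF m f ≤ N → ∀ (p : String) (k k' : Nat),
      muF m f < k → muF m f < k' → goA m k p f = goA m k' p f := by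
  intro N
  induction N with
  | zero =>
    intro f hf p k k' hk hk'
    obtain ⟨a, rfl⟩ : ∃ a, k = a + 1 := ⟨k - 1, by omega⟩
    obtain ⟨b, rfl⟩ : ∃ b, k' = b + 1 := ⟨k' - 1, by omega⟩
    rw [goA_succ_eq, goA_succ_eq]
    have hnil : nwOf (selL m p) f = [] := by
      have := mu_split m f p
      have hlen : (nwOf (selL m p) f).length = 0 := by omega
      exact List.eq_nil_of_length_eq_zero hlen
    rw [hnil]
    rfl
  | succ N ih =>
    intro f hf p k k' hk hk'
    obtain ⟨a, rfl⟩ : ∃ a, k = a + 1 := ⟨k - 1, by omega⟩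
    obtain ⟨b, rfl⟩ : ∃ b, k' = b + 1 := ⟨k' - 1, by omega⟩
    rw [goA_succ_eq, goA_succ_eq]
    by_cases hnil : nwOf (selL m p) f = []
    · rw [hnil]; rfl
    · have hsplit := mu_split m f p
      have hlenpos : (nwOf (selL m p) f).length ≠ 0 :=
        fun h => hnil (List.eq_nil_of_length_eq_zero h)
      have inner : ∀ (l : List String) (f0 : List String),
          muF m f0 ≤ N → muF m f0 < a → muF m f0 < b →
          l.foldl (fun f g => goA m a g f) f0 = l.foldl (fun f g => goA m b g f) f0 := by
        intro l
        induction l with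
        | nil => intro f0 _ _ _; rfl
        | cons g l ihl =>
          intro f0 h0 ha hb
          simp only [List.foldl_cons]
          rw [ih f0 h0 g a b ha hb]
          obtain ⟨t, ht⟩ := goA_extend m b g f0
          have hmono : muF m (goA m b g f0) ≤ muF m f0 := by
            rw [ht]
            exact mu_antitone m f0 (f0 ++ t) (fun x hx => List.mem_append.mpr (Or.inl hx))
          exact ihl (goA m b g f0) (le_trans hmono h0) (lt_of_le_of_lt hmono ha)
            (lt_of_le_of_lt hmono hb)
      exact inner _ _ (by omega) (by omega) (by omega)

theorem fold_cgo (m : List (String × List String)) (k : Nat) :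
    ∀ (l : List String) (f : List String), muF m f < k →
      l.foldl (fun f g => goA m k g f) f = l.foldl (cgo m) f := by
  intro l
  induction l with
  | nil => intro f _; rfl
  | cons g l ihl =>
    intro f hk
    simp only [List.foldl_cons]
    have hg : goA m k g f = cgo m f g :=
      goA_fuel_irrel m (muF m f) f le_rfl g k (muF m f + 1) hk (Nat.lt_succ_self _)
    rw [hg]
    obtain ⟨t, ht⟩ := goA_extend m (muF m f + 1) g f
    have hmono : muF m (cgo m f g) ≤ muF m f := by
      unfold cgo
      rw [ht]
      exact mu_antitone m f (f ++ t) (fun x hx => List.mem_append.mpr (Or.inl hx))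
    exact ihl (cgo m f g) (lt_of_le_of_lt hmono hk)

theorem cgo_eq_fold (m : List (String × List String)) (p : String) (f : List String) :
    cgo m f p = (nwOf (selL m p) f).foldl (cgo m) (f ++ nwOf (selL m p) f) := by
  unfold cgo
  rw [goA_succ_eq]
  by_cases hnil : nwOf (selL m p) f = []
  · rw [hnil]; rfl
  · have hsplit := mu_split m f p
    have hlenpos : (nwOf (selL m p) f).length ≠ 0 :=
      fun h => hnil (List.eq_nil_of_length_eq_zero h)
    exact fold_cgo m (muF m f) _ _ (by omega)

theorem loop_eq (m : List (String × List String)) :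
    ∀ (fuel : Nat) (f : List String) (s : List String), s.length + muF m f < fuel →
      loopB (buildIdxB m) fuel f s = s.foldl (cgo m) f := by
  intro fuel
  induction fuel with
  | zero => intro f s h; omega
  | succ n ih =>
    intro f s h
    match s with
    | [] => rfl
    | p :: rest =>
      show loopB (buildIdxB m) n
          (((buildIdxB m).getD p []).foldl
            (fun (st : List String × PySem.Set String) g =>
              if g ∉ st.2 then (st.1 ++ [g], PySem.Set.add st.2 g) else st) ([], f)).2
          ((((buildIdxB m).getD p []).foldl
            (fun (st : List String × PySem.Set String) g =>
              if g ∉ st.2 then (st.1 ++ [g], PySem.Set.add st.2 g) else st) ([], f)).1 ++ rest)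
        = _
      rw [idx_getD m p]
      rw [foldB_snd]
      have hfst : ((selL m p).foldl
          (fun (st : List String × PySem.Set String) g =>
            if g ∉ st.2 then (st.1 ++ [g], PySem.Set.add st.2 g) else st) ([], f)).1
          = nwOf (selL m p) f := rfl
      rw [hfst]
      have hsplit := mu_split m f p
      rw [ih (f ++ nwOf (selL m p) f) (nwOf (selL m p) f ++ rest) (by
        simp only [List.length_append, List.length_cons] at h ⊢
        omega)]
      rw [List.foldl_append]
      rw [← cgo_eq_fold m p f]
      rfl

-- ===== VERDICT (by name: the statement is the Claim_ definition above) =====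
theorem find_all_groups_for_principal_id_py_spec : Claim_equal_find_all_groups_for_principal_id_py := by
  intro mapping principal_id found _
  unfold Spec_find_all_groups_for_principal_id_py
  unfold find_all_groups_for_principal_id_py find_all_groups_for_principal_id_py_alt
  cases found with
  | none =>
    show goA mapping (mapping.length + 1) principal_id PySem.Set.empty
      = loopB (buildIdxB mapping) (mapping.length + 2) PySem.Set.empty [principal_id]
    rw [loop_eq mapping (mapping.length + 2) PySem.Set.empty [principal_id]
      (by have := mu_le_len mapping PySem.Set.empty; simp only [List.length_cons, List.length_nil]; omega)]
    simp only [List.foldl_cons, List.foldl_nil]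
    exact goA_fuel_irrel mapping (muF mapping PySem.Set.empty) PySem.Set.empty le_rfl principal_id
      (mapping.length + 1) (muF mapping PySem.Set.empty + 1)
      (by have := mu_le_len mapping PySem.Set.empty; omega) (Nat.lt_succ_self _)
  | some l =>
    show goA mapping (mapping.length + 1) principal_id (PySem.Set.ofList l)
      = loopB (buildIdxB mapping) (mapping.length + 2) (PySem.Set.ofList l) [principal_id]
    rw [loop_eq mapping (mapping.length + 2) (PySem.Set.ofList l) [principal_id]
      (by have := mu_le_len mapping (PySem.Set.ofList l); simp only [List.length_cons, List.length_nil]; omega)]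
    simp only [List.foldl_cons, List.foldl_nil]
    exact goA_fuel_irrel mapping (muF mapping (PySem.Set.ofList l)) (PySem.Set.ofList l) le_rfl principal_id
      (mapping.length + 1) (muF mapping (PySem.Set.ofList l) + 1)
      (by have := mu_le_len mapping (PySem.Set.ofList l); omega) (Nat.lt_succ_self _)
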